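-- pv_equiv track=rewrite | github.com/msrosenberg/ImpactFactor | Impact_Funcs.py | calculate_th_index
-- ===== SOURCE A (Python) =====
-- def calculate_th_index(citations: list, years: list, total_cites: int) -> int:
--     target = total_cites / 2
--     cite_sum = 0
--     maxy = max(years)
--     cur_y = maxy + 1
--     while cite_sum < target:
--         cur_y -= 1
--         for i, y in enumerate(years):
--             if y == cur_y:
--                 cite_sum += citations[i]
--     return maxy - cur_y + 1
-- ===== SOURCE B (Python) =====
-- def calculate_th_index(citations: list, years: list, total_cites: int) -> int:
--     maxy = max(years)
--     if total_cites <= 0: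
--         return 0
--     reached = [y for y in set(years)
--                if 2 * sum(c for yy, c in zip(years, citations) if yy >= y) >= total_cites]
--     return maxy - max(reached) + 1
-- ===== Notes on version B (the rewrite author's own statement) =====
-- stated objective: alternative
-- what changed: A counts down calendar years one at a time, rescanning every publication per year while mutating a running sum; B has no countdown loop and no running state: it directly selects the latest distinct publication year whose from-that-year-on citation total reaches half the grand total (filter over set(years) + max).
-- outside the precondition, e.g. on calculate_th_index([10], [5, 3], 4): A returns 1, B returns 1
import Mathlib
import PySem

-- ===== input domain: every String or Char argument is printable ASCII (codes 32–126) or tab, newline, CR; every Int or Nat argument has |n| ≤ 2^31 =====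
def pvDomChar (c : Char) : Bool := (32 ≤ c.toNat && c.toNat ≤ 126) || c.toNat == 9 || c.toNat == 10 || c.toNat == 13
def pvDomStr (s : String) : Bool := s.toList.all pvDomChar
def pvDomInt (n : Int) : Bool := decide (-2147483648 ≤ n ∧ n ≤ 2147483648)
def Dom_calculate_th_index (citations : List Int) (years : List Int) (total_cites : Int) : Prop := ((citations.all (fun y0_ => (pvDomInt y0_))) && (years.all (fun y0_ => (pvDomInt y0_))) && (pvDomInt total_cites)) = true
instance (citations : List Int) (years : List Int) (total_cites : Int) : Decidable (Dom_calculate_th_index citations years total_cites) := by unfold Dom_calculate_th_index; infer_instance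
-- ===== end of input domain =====

-- B replaces A's calendar-year countdown loop (mutable running sum) by a direct
-- choice: the latest publication year whose from-then-on citation total reaches half —
-- a different decomposition of the same value (objective: alternative, no speed claim).

-- ===== PORT A =====
-- inner loop: 'for i, y in enumerate(years): if y == cur_y: cite_sum += citations[i]'
-- citations[i] is pyGet?; the '.getD 0' branch is unreachable under Pre_ (years.length ≤ citations.length)
def thInner (citations years : List Int) (cur_y cs : Int) : Int :=
  (PySem.List.enumerate years 0).foldl
    (fun s p => if p.2 = cur_y then s + ((PySem.List.pyGet? citations p.1).getD 0) else s) cs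

-- the while loop; fuel only makes it total (where the target is never reached the Python
-- loop diverges — excluded by Pre_).  '2 * cs < total' is the exact integer form of
-- Python's 'cite_sum < total_cites / 2' (int/float comparison is exact on this domain).
def thLoop (citations years : List Int) (total : Int) : Nat → Int → Int → Int
  | 0, cur_y, _ => cur_y
  | fuel + 1, cur_y, cs =>
      if 2 * cs < total then
        thLoop citations years total fuel (cur_y - 1) (thInner citations years (cur_y - 1) cs)
      else cur_y

def calculate_th_index (citations : List Int) (years : List Int) (total_cites : Int) : Int :=
  let maxy := (PySem.List.max? years (fun y => y)).getD 0
  let miny := (PySem.List.min? years (fun y => y)).getD 0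
  let fuel := (maxy - miny + 1).toNat + 1
  maxy - thLoop citations years total_cites fuel (maxy + 1) 0 + 1

-- ===== PORT B =====
-- 'sum(c for yy, c in zip(years, citations) if yy >= y)'
def suffSum (citations years : List Int) (y : Int) : Int :=
  (years.zip citations).foldl (fun s p => if y ≤ p.1 then s + p.2 else s) 0

def calculate_th_index_alt (citations : List Int) (years : List Int) (total_cites : Int) : Int :=
  let maxy := (PySem.List.max? years (fun y => y)).getD 0
  if total_cites ≤ 0 then 0
  else
    let reached := (PySem.Set.ofList years).filter
      (fun y => decide (total_cites ≤ 2 * suffSum citations years y))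
    maxy - ((PySem.List.max? reached (fun y => y)).getD 0) + 1

-- ===== PRECONDITION & SPEC =====
-- Pre_ excludes: years = [] (A's max() raises ValueError); inputs with fewer citations than
-- years — mismatched parallel lists on which A raises IndexError except when it happens to
-- stop early (and where it does return, B returns the same value: see claim cites); and
-- inputs whose citations never reach half the total, on which A's while loop diverges.
def Pre_calculate_th_index (citations : List Int) (years : List Int) (total_cites : Int) : Prop :=
  years ≠ [] ∧ years.length ≤ citations.length ∧
  (0 < total_cites →
    ∃ y ∈ years,
      total_cites ≤ 2 * ((((years.zip citations).filter (fun p => decide (y ≤ p.1))).map Prod.snd).sum)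
    )
instance (citations : List Int) (years : List Int) (total_cites : Int) : Decidable (Pre_calculate_th_index citations years total_cites) := by unfold Pre_calculate_th_index; infer_instance

def pvWitness_calculate_th_index : List Int × List Int × Int := ([3, 1], [2020, 2019], 4)

def Spec_calculate_th_index (citations : List Int) (years : List Int) (total_cites : Int) (out : Int) : Prop := out = calculate_th_index_alt citations years total_cites
instance (citations : List Int) (years : List Int) (total_cites : Int) (out : Int) : Decidable (Spec_calculate_th_index citations years total_cites out) := by unfold Spec_calculate_th_index; infer_instance

-- ===== CLAIM (what is proved, stated in full; the proofs are below) =====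
def Claim_equal_calculate_th_index : Prop := ∀ (citations : List Int) (years : List Int) (total_cites : Int), Dom_calculate_th_index citations years total_cites → Pre_calculate_th_index citations years total_cites → Spec_calculate_th_index citations years total_cites (calculate_th_index citations years total_cites)

-- ===== LEMMAS AND PROOFS =====

-- 'Psum L y' = the citations of all pairs whose year is ≥ y (the mathematical shape both
-- programs' sums reduce to); 'Gsum L y' = citations of the pairs of year exactly y.
def Psum (L : List (Int × Int)) (y : Int) : Int :=
  (L.map (fun p => if y ≤ p.1 then p.2 else 0)).sum

def Gsum (L : List (Int × Int)) (y : Int) : Int :=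
  (L.map (fun p => if p.1 = y then p.2 else 0)).sum

lemma suffSum_eq_Psum (citations years : List Int) (y : Int) :
    suffSum citations years y = Psum (years.zip citations) y := by
  have h1 : (years.zip citations).foldl (fun s (p : Int × Int) => if y ≤ p.1 then s + p.2 else s) 0
      = (years.zip citations).foldl (fun s p => s + (if y ≤ p.1 then p.2 else 0)) 0 :=
    PySem.List.foldl_congr_mem _ _ _ _ (by intro acc x _; split <;> simp)
  unfold suffSum
  rw [h1, PySem.List.foldl_add]; simp [Psum]

lemma pre_sum_eq_Psum (L : List (Int × Int)) (y : Int) :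
    ((L.filter (fun p => decide (y ≤ p.1))).map Prod.snd).sum = Psum L y := by
  induction L with
  | nil => simp [Psum]
  | cons p L ih =>
    simp only [List.filter_cons, Psum, List.map_cons, List.sum_cons] at *
    split <;> simp_all

lemma Psum_step (L : List (Int × Int)) (y : Int) :
    Psum L y = Psum L (y + 1) + Gsum L y := by
  induction L with
  | nil => simp [Psum, Gsum]
  | cons p L ih =>
    simp only [Psum, Gsum, List.map_cons, List.sum_cons] at *
    split_ifs <;> omega

lemma Psum_eq_zero (L : List (Int × Int)) (y : Int) (h : ∀ p ∈ L, p.1 < y) :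
    Psum L y = 0 := by
  induction L with
  | nil => simp [Psum]
  | cons p L ih =>
    have := h p (by simp)
    simp only [Psum, List.map_cons, List.sum_cons] at *
    rw [if_neg (by omega), ih (fun q hq => h q (by simp [hq]))]; ring

lemma thInner_aux (cur_y : Int) :
    ∀ (years : List Int) (citations : List Int) (k : Nat) (cs : Int),
      years.length + k ≤ citations.length →
      (PySem.List.enumerate years (k : Int)).foldl
        (fun s p => if p.2 = cur_y then s + ((PySem.List.pyGet? citations p.1).getD 0) else s) cs
        = cs + Gsum (years.zip (citations.drop k)) cur_y := by
  intro years
  induction years with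
  | nil => intro citations k cs _; simp [PySem.List.enumerate_nil, Gsum]
  | cons y0 ys ih =>
    intro citations k cs hlen
    have hk : k < citations.length := by simp at hlen; omega
    have hdrop : citations.drop k = citations[k] :: citations.drop (k + 1) :=
      List.drop_eq_getElem_cons hk
    rw [PySem.List.enumerate_cons, List.foldl_cons]
    have hcast : (k : Int) + 1 = ((k + 1 : Nat) : Int) := by push_cast; ring
    rw [hcast, ih citations (k + 1) _ (by simp at hlen ⊢; omega)]
    simp only [PySem.List.pyGet?_natCast, List.getElem?_eq_getElem hk, Option.getD_some,
      hdrop, List.zip_cons_cons, Gsum, List.map_cons, List.sum_cons]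
    split_ifs with h <;> ring

lemma thInner_eq (citations years : List Int) (cur_y : Int)
    (hlen : years.length ≤ citations.length) (cs : Int) :
    thInner citations years cur_y cs = cs + Gsum (years.zip citations) cur_y := by
  have := thInner_aux cur_y years citations 0 cs (by omega)
  simpa [thInner] using this

lemma thLoop_eq (citations years : List Int) (total ystar : Int)
    (hlen : years.length ≤ citations.length)
    (hy : total ≤ 2 * Psum (years.zip citations) ystar)
    (habove : ∀ y, ystar < y → 2 * Psum (years.zip citations) y < total) :
    ∀ (fuel : Nat) (c : Int), ystar ≤ c → c - ystar < (fuel : Int) →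
      thLoop citations years total fuel c (Psum (years.zip citations) c) = ystar := by
  intro fuel
  induction fuel with
  | zero => intro c h1 h2; simp at h2; omega
  | succ f ih =>
    intro c h1 h2
    by_cases hce : c = ystar
    · subst hce
      rw [thLoop, if_neg (by omega)]
    · have hlt : ystar < c := by omega
      rw [thLoop, if_pos (habove c hlt)]
      have hstep : thInner citations years (c - 1) (Psum (years.zip citations) c)
          = Psum (years.zip citations) (c - 1) := by
        rw [thInner_eq citations years (c - 1) hlen]
        have := Psum_step (years.zip citations) (c - 1)
        simp only [sub_add_cancel] at this
        omega
      rw [hstep]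
      exact ih (c - 1) (by omega) (by push_cast at h2 ⊢; omega)

theorem calculate_th_index_spec_aux :
    ∀ (citations years : List Int) (total_cites : Int),
      Pre_calculate_th_index citations years total_cites →
      calculate_th_index citations years total_cites
        = calculate_th_index_alt citations years total_cites := by
  intro citations years total hpre
  obtain ⟨hne, hlen, hterm⟩ := hpre
  obtain ⟨m, hm⟩ : ∃ m, PySem.List.max? years (fun y => y) = some m := by
    cases h : PySem.List.max? years (fun y => y) with
    | none => exact absurd ((PySem.List.max?_eq_none_iff _ _).mp h) hne
    | some m => exact ⟨m, rfl⟩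
  obtain ⟨mn, hmn⟩ : ∃ mn, PySem.List.min? years (fun y => y) = some mn := by
    cases h : PySem.List.min? years (fun y => y) with
    | none => exact absurd ((PySem.List.min?_eq_none_iff _ _).mp h) hne
    | some mn => exact ⟨mn, rfl⟩
  have hmax : ∀ z ∈ years, z ≤ m := fun z hz => PySem.List.max?_isMax hm z hz
  have hmin : ∀ z ∈ years, mn ≤ z := fun z hz => PySem.List.min?_isMin hmn z hz
  simp only [calculate_th_index, calculate_th_index_alt, hm, hmn, Option.getD_some]
  by_cases ht : total ≤ 0
  · rw [if_pos ht, thLoop, if_neg (by omega)]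
    omega
  · push_neg at ht
    obtain ⟨y0, hy0mem, hy0⟩ := hterm ht
    rw [pre_sum_eq_Psum] at hy0
    have hfilter : (PySem.Set.ofList years).filter
          (fun y => decide (total ≤ 2 * suffSum citations years y))
        = (PySem.Set.ofList years).filter
          (fun y => decide (total ≤ 2 * Psum (years.zip citations) y)) :=
      List.filter_congr (by intro a _; rw [suffSum_eq_Psum])
    rw [if_neg (by omega), hfilter]
    have hy0R : y0 ∈ (PySem.Set.ofList years).filter
        (fun y => decide (total ≤ 2 * Psum (years.zip citations) y)) :=
      List.mem_filter.mpr ⟨(PySem.Set.mem_ofList _ _).mpr hy0mem, by simpa using hy0⟩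
    obtain ⟨ys, hys⟩ : ∃ ys, PySem.List.max?
        ((PySem.Set.ofList years).filter
          (fun y => decide (total ≤ 2 * Psum (years.zip citations) y)))
        (fun y => y) = some ys := by
      cases h : PySem.List.max? ((PySem.Set.ofList years).filter
          (fun y => decide (total ≤ 2 * Psum (years.zip citations) y))) (fun y => y) with
      | none => exact absurd (List.ne_nil_of_mem hy0R) (by simp [(PySem.List.max?_eq_none_iff _ _).mp h])
      | some ys => exact ⟨ys, rfl⟩
    rw [hys, Option.getD_some]
    have hysR := PySem.List.max?_mem hys
    have hysmem : ys ∈ years := (PySem.Set.mem_ofList _ _).mp (List.mem_filter.mp hysR).1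
    have hyscond : total ≤ 2 * Psum (years.zip citations) ys := by
      simpa using (List.mem_filter.mp hysR).2
    have hysmax : ∀ z ∈ (PySem.Set.ofList years).filter
        (fun y => decide (total ≤ 2 * Psum (years.zip citations) y)), z ≤ ys :=
      fun z hz => PySem.List.max?_isMax hys z hz
    have habove : ∀ y, ys < y → 2 * Psum (years.zip citations) y < total := by
      intro y hlt
      by_contra hcon
      push_neg at hcon
      cases hge : years.filter (fun z => decide (y ≤ z)) with
      | nil =>
        have hall : ∀ p ∈ years.zip citations, p.1 < y := by
          intro p hp
          have hp1 := (List.of_mem_zip hp).1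
          have := List.filter_eq_nil_iff.mp hge p.1 hp1
          simp at this; omega
        rw [Psum_eq_zero _ _ hall] at hcon
        omega
      | cons a l =>
        obtain ⟨d, hd⟩ : ∃ d, PySem.List.min? (years.filter (fun z => decide (y ≤ z)))
            (fun z => z) = some d := by
          cases h : PySem.List.min? (years.filter (fun z => decide (y ≤ z))) (fun z => z) with
          | none => rw [(PySem.List.min?_eq_none_iff _ _).mp h] at hge; cases hge
          | some d => exact ⟨d, rfl⟩
        have hdF := PySem.List.min?_mem hd
        have hdmem : d ∈ years := (List.mem_filter.mp hdF).1
        have hdy : y ≤ d := by simpa using (List.mem_filter.mp hdF).2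
        have hdmin : ∀ z ∈ years.filter (fun z => decide (y ≤ z)), d ≤ z :=
          fun z hz => PySem.List.min?_isMin hd z hz
        have hPyd : Psum (years.zip citations) y = Psum (years.zip citations) d := by
          unfold Psum
          congr 1
          apply List.map_congr_left
          intro p hp
          have hp1 := (List.of_mem_zip hp).1
          by_cases h1 : y ≤ p.1
          · have : d ≤ p.1 := hdmin p.1 (List.mem_filter.mpr ⟨hp1, by simpa using h1⟩)
            rw [if_pos h1, if_pos this]
          · rw [if_neg h1, if_neg (by omega)]
        rw [hPyd] at hcon
        have hdR : d ∈ (PySem.Set.ofList years).filter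
            (fun z => decide (total ≤ 2 * Psum (years.zip citations) z)) :=
          List.mem_filter.mpr ⟨(PySem.Set.mem_ofList _ _).mpr hdmem, by simpa using hcon⟩
        have := hysmax d hdR
        omega
    have hinit : Psum (years.zip citations) (m + 1) = 0 :=
      Psum_eq_zero _ _ (fun p hp => by
        have := hmax p.1 (List.of_mem_zip hp).1; omega)
    have hfuel : (m + 1) - ys < (((m - mn + 1).toNat + 1 : Nat) : Int) := by
      have h1 := hmin ys hysmem
      have h2 := hmax ys hysmem
      have h3 : ((m - mn + 1).toNat : Int) = m - mn + 1 := Int.toNat_of_nonneg (by omega)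
      push_cast
      omega
    have hloop := thLoop_eq citations years total ys hlen hyscond habove
      ((m - mn + 1).toNat + 1) (m + 1) (by have := hmax ys hysmem; omega) hfuel
    rw [← hinit] at *
    rw [hloop]

-- ===== VERDICT (by name: the statement is the Claim_ definition above) =====
theorem calculate_th_index_spec : Claim_equal_calculate_th_index := by
  intro citations years total_cites _ hpre
  exact calculate_th_index_spec_aux citations years total_cites hpre
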